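-- pv_equiv track=rewrite | github.com/Milky2018/wasmoon | scripts/run_component_wast.py | read_symbol
-- ===== SOURCE A (Python) =====
-- from typing import Optional, Tuple
--
-- def skip_line_comment(text: str, i: int) -> int:
--     while i < len(text) and text[i] != "\n":
--         i += 1
--     return i
--
-- def skip_block_comment(text: str, i: int) -> int:
--     depth = 1
--     i += 2
--     while i < len(text) and depth > 0:
--         if text[i] == "(" and i + 1 < len(text) and text[i + 1] == ";":
--             depth += 1
--             i += 2
--             continue
--         if text[i] == ";" and i + 1 < len(text) and text[i + 1] == ")":
--             depth -= 1
--             i += 2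
--             continue
--         i += 1
--     return i
--
-- def skip_ws_and_comments(text: str, i: int) -> int:
--     while i < len(text):
--         c = text[i]
--         if c.isspace():
--             i += 1
--             continue
--         if c == ";" and i + 1 < len(text) and text[i + 1] == ";":
--             i = skip_line_comment(text, i + 2)
--             continue
--         if c == "(" and i + 1 < len(text) and text[i + 1] == ";":
--             i = skip_block_comment(text, i)
--             continue
--         break
--     return i
--
-- def read_symbol(text: str, i: int) -> Tuple[Optional[str], int]:
--     i = skip_ws_and_comments(text, i)
--     if i >= len(text):
--         return None, i
--     start = i
--     while i < len(text) and not text[i].isspace() and text[i] not in ("(", ")"):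
--         i += 1
--     if start == i:
--         return None, i
--     return text[start:i], i
-- ===== SOURCE B (Python) =====
-- from typing import Optional, Tuple
--
--
-- def read_symbol(text: str, i: int) -> Tuple[Optional[str], int]:
--     # One flat state machine: mode 0 = skipping whitespace, -1 = in a line
--     # comment, d >= 1 = in a block comment at nesting depth d.
--     n = len(text)
--     mode = 0
--     while i < n:
--         c = text[i]
--         if mode >= 1:
--             if c == "(" and i + 1 < n and text[i + 1] == ";":
--                 i, mode = i + 2, mode + 1
--             elif c == ";" and i + 1 < n and text[i + 1] == ")":
--                 i, mode = i + 2, mode - 1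
--             else:
--                 i += 1
--         elif mode == -1:
--             mode = 0 if c == "\n" else -1
--             i += 1
--         elif c.isspace():
--             i += 1
--         elif c == ";" and i + 1 < n and text[i + 1] == ";":
--             i, mode = i + 2, -1
--         elif c == "(" and i + 1 < n and text[i + 1] == ";":
--             i, mode = i + 2, 1
--         elif c == "(" or c == ")":
--             return None, i
--         else:
--             j = i + 1
--             while j < n and not text[j].isspace() and text[j] != "(" and text[j] != ")":
--                 j += 1
--             return text[i:j], j
--     return None, i
-- ===== Notes on version B (the rewrite author's own statement) =====
-- stated objective: simpler
-- what changed: A's four staged helper loops (line-comment skipper, depth-counter block-comment skipper, whitespace/comment dispatcher, symbol scanner glued together in read_symbol) are replaced by one flat single-pass state machine: a single while loop over (index, mode) where mode encodes skipping-ws / in-line-comment / block-comment-depth, returning the result pair directly.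
import Mathlib
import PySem

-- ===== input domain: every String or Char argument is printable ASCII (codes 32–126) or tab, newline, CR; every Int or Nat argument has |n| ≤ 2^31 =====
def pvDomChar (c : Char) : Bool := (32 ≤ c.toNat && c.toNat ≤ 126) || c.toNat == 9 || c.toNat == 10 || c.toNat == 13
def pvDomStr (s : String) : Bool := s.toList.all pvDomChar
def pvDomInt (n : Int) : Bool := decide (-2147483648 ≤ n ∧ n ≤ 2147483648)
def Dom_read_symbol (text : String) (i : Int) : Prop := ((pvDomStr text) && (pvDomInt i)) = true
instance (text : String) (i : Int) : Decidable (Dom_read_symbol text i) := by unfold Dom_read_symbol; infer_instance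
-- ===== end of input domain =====

-- B replaces A's four staged helper loops (line-comment skipper, depth-counter block
-- skipper, ws/comment dispatcher, symbol scanner) by ONE flat state machine: a single
-- loop over (index, mode) with mode ∈ {-1 line comment, 0 whitespace, d ≥ 1 block
-- depth}, returning the result pair directly; objective: simpler (no speed claim).
-- Every Python while loop is ported as structural recursion on a fuel argument whose
-- initial value (remaining scan length + 1) exceeds the number of loop iterations, so
-- each fueled port computes exactly what its Python loop computes.

-- ===== PORT A =====
-- skip_line_comment: while i < len(text) and text[i] != "\n": i += 1
def lineAF (cs : List Char) : Nat → Int → Int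
  | 0, i => i
  | f + 1, i =>
    if i < (cs.length : Int) ∧ PySem.List.pyGetD cs i ' ' ≠ '\n' then
      lineAF cs f (i + 1)
    else i

def lineA (cs : List Char) (i : Int) : Int :=
  lineAF cs (((cs.length : Int) - i).toNat + 1) i

-- the while loop of skip_block_comment, state (i, depth)
def loopAF (cs : List Char) : Nat → Int → Int → Int
  | 0, i, _ => i
  | f + 1, i, depth =>
    if i < (cs.length : Int) ∧ 0 < depth then
      if PySem.List.pyGetD cs i ' ' = '(' ∧ i + 1 < (cs.length : Int) ∧
          PySem.List.pyGetD cs (i + 1) ' ' = ';' then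
        loopAF cs f (i + 2) (depth + 1)
      else if PySem.List.pyGetD cs i ' ' = ';' ∧ i + 1 < (cs.length : Int) ∧
          PySem.List.pyGetD cs (i + 1) ' ' = ')' then
        loopAF cs f (i + 2) (depth - 1)
      else
        loopAF cs f (i + 1) depth
    else i

-- skip_block_comment: depth = 1; i += 2; then the while loop
def blockA (cs : List Char) (i : Int) : Int :=
  loopAF cs (((cs.length : Int) - (i + 2)).toNat + 1) (i + 2) 1

-- skip_ws_and_comments
def wsAF (cs : List Char) : Nat → Int → Int
  | 0, i => i
  | f + 1, i =>
    if i < (cs.length : Int) then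
      if PySem.Chars.isspace (PySem.List.pyGetD cs i ' ') then
        wsAF cs f (i + 1)
      else if PySem.List.pyGetD cs i ' ' = ';' ∧ i + 1 < (cs.length : Int) ∧
          PySem.List.pyGetD cs (i + 1) ' ' = ';' then
        wsAF cs f (lineA cs (i + 2))
      else if PySem.List.pyGetD cs i ' ' = '(' ∧ i + 1 < (cs.length : Int) ∧
          PySem.List.pyGetD cs (i + 1) ' ' = ';' then
        wsAF cs f (blockA cs i)
      else i
    else i

def wsA (cs : List Char) (i : Int) : Int :=
  wsAF cs (((cs.length : Int) - i).toNat + 1) i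

-- the symbol-reading while loop of read_symbol
def symAF (cs : List Char) : Nat → Int → Int
  | 0, i => i
  | f + 1, i =>
    if i < (cs.length : Int) ∧ ¬ PySem.Chars.isspace (PySem.List.pyGetD cs i ' ') ∧
        PySem.List.pyGetD cs i ' ' ≠ '(' ∧ PySem.List.pyGetD cs i ' ' ≠ ')' then
      symAF cs f (i + 1)
    else i

def symA (cs : List Char) (i : Int) : Int :=
  symAF cs (((cs.length : Int) - i).toNat + 1) i

def read_symbol (text : String) (i : Int) : Option String × Int :=
  let cs := text.toList
  let i1 := wsA cs i
  if i1 ≥ (cs.length : Int) then (none, i1)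
  else
    let k := symA cs i1
    if i1 = k then (none, k)
    else (some (String.ofList (PySem.List.slice cs (some i1) (some k))), k)

-- ===== PORT B =====
-- the inner symbol loop of B (start fixed, j advances), returning the result pair
def symBF (cs : List Char) (start : Int) : Nat → Int → Option String × Int
  | 0, j => (some (String.ofList (PySem.List.slice cs (some start) (some j))), j)
  | f + 1, j =>
    if j < (cs.length : Int) ∧ ¬ PySem.Chars.isspace (PySem.List.pyGetD cs j ' ') ∧
        PySem.List.pyGetD cs j ' ' ≠ '(' ∧ PySem.List.pyGetD cs j ' ' ≠ ')' then
      symBF cs start f (j + 1)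
    else (some (String.ofList (PySem.List.slice cs (some start) (some j))), j)

def symB (cs : List Char) (start j : Int) : Option String × Int :=
  symBF cs start (((cs.length : Int) - j).toNat + 1) j

-- B's single while loop over the state (i, mode): one tail call per iteration
def scanBF (cs : List Char) : Nat → Int → Int → Option String × Int
  | 0, i, _ => (none, i)
  | f + 1, i, mode =>
    if i < (cs.length : Int) then
      if 1 ≤ mode then
        if PySem.List.pyGetD cs i ' ' = '(' ∧ i + 1 < (cs.length : Int) ∧
            PySem.List.pyGetD cs (i + 1) ' ' = ';' then
          scanBF cs f (i + 2) (mode + 1)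
        else if PySem.List.pyGetD cs i ' ' = ';' ∧ i + 1 < (cs.length : Int) ∧
            PySem.List.pyGetD cs (i + 1) ' ' = ')' then
          scanBF cs f (i + 2) (mode - 1)
        else
          scanBF cs f (i + 1) mode
      else if mode = -1 then
        scanBF cs f (i + 1) (if PySem.List.pyGetD cs i ' ' = '\n' then 0 else -1)
      else if PySem.Chars.isspace (PySem.List.pyGetD cs i ' ') then
        scanBF cs f (i + 1) mode
      else if PySem.List.pyGetD cs i ' ' = ';' ∧ i + 1 < (cs.length : Int) ∧
          PySem.List.pyGetD cs (i + 1) ' ' = ';' then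
        scanBF cs f (i + 2) (-1)
      else if PySem.List.pyGetD cs i ' ' = '(' ∧ i + 1 < (cs.length : Int) ∧
          PySem.List.pyGetD cs (i + 1) ' ' = ';' then
        scanBF cs f (i + 2) 1
      else if PySem.List.pyGetD cs i ' ' = '(' ∨ PySem.List.pyGetD cs i ' ' = ')' then
        (none, i)
      else
        symB cs i (i + 1)
    else (none, i)

def read_symbol_alt (text : String) (i : Int) : Option String × Int :=
  scanBF text.toList (((text.toList.length : Int) - i).toNat + 1) i 0

-- ===== PRECONDITION & SPEC =====
-- Pre_ excludes exactly the start indices i < -len(text), where Python's text[i]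
-- raises IndexError (in A and in B alike) on the very first read.
def Pre_read_symbol (text : String) (i : Int) : Prop := -(PySem.Str.len text) ≤ i
instance (text : String) (i : Int) : Decidable (Pre_read_symbol text i) := by
  unfold Pre_read_symbol; infer_instance

def pvWitness_read_symbol : String × Int := ("(; c ;) sym", 0)

def Spec_read_symbol (text : String) (i : Int) (out : Option String × Int) : Prop :=
  out = read_symbol_alt text i
instance (text : String) (i : Int) (out : Option String × Int) :
    Decidable (Spec_read_symbol text i out) := by unfold Spec_read_symbol; infer_instance

-- ===== CLAIM (what is proved, stated in full; the proofs are below) =====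
def Claim_equal_read_symbol : Prop := ∀ (text : String) (i : Int),
  Dom_read_symbol text i → Pre_read_symbol text i → Spec_read_symbol text i (read_symbol text i)

-- ===== LEMMAS AND PROOFS =====
-- the tail of A's read_symbol, as a function of the post-skip index
def postA (cs : List Char) (j : Int) : Option String × Int :=
  if j ≥ (cs.length : Int) then (none, j)
  else
    let k := symA cs j
    if j = k then (none, k)
    else (some (String.ofList (PySem.List.slice cs (some j) (some k))), k)

-- where A's staged pipeline stands when B's machine is at (i, mode)
def entryA (cs : List Char) (i mode : Int) : Int :=
  if 1 ≤ mode then loopAF cs (((cs.length : Int) - i).toNat + 1) i mode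
  else if mode = -1 then lineA cs i else i

-- lower bounds: each loop only moves the index forward
theorem lineAF_ge (cs : List Char) (f : Nat) (i : Int) : i ≤ lineAF cs f i := by
  induction f generalizing i with
  | zero => simp [lineAF]
  | succ f ih =>
    unfold lineAF
    split
    · have := ih (i + 1); omega
    · omega

theorem loopAF_ge (cs : List Char) (f : Nat) (i d : Int) : i ≤ loopAF cs f i d := by
  induction f generalizing i d with
  | zero => simp [loopAF]
  | succ f ih =>
    unfold loopAF
    split
    · split
      · have := ih (i + 2) (d + 1); omega
      · split
        · have := ih (i + 2) (d - 1); omega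
        · have := ih (i + 1) d; omega
    · omega

theorem symAF_ge (cs : List Char) (f : Nat) (i : Int) : i ≤ symAF cs f i := by
  induction f generalizing i with
  | zero => simp [symAF]
  | succ f ih =>
    unfold symAF
    split
    · have := ih (i + 1); omega
    · omega

-- with enough fuel the value of a fueled loop does not depend on the fuel
theorem lineAF_suff (cs : List Char) (f₁ : Nat) : ∀ f₂ : Nat, ∀ i : Int,
    ((cs.length : Int) - i).toNat < f₁ → ((cs.length : Int) - i).toNat < f₂ →
    lineAF cs f₁ i = lineAF cs f₂ i := by
  induction f₁ with
  | zero => intro f₂ i h1 _; omega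
  | succ f₁ ih =>
    intro f₂ i h1 h2
    match f₂, h2 with
    | f₂ + 1, h2 =>
      unfold lineAF
      by_cases h : i < (cs.length : Int) ∧ PySem.List.pyGetD cs i ' ' ≠ '\n'
      · rw [if_pos h, if_pos h]; exact ih f₂ (i + 1) (by omega) (by omega)
      · rw [if_neg h, if_neg h]

theorem loopAF_suff (cs : List Char) (f₁ : Nat) : ∀ f₂ : Nat, ∀ i d : Int,
    ((cs.length : Int) - i).toNat < f₁ → ((cs.length : Int) - i).toNat < f₂ →
    loopAF cs f₁ i d = loopAF cs f₂ i d := by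
  induction f₁ with
  | zero => intro f₂ i d h1 _; omega
  | succ f₁ ih =>
    intro f₂ i d h1 h2
    match f₂, h2 with
    | f₂ + 1, h2 =>
      unfold loopAF
      by_cases h : i < (cs.length : Int) ∧ 0 < d
      · rw [if_pos h, if_pos h]
        split
        · exact ih f₂ (i + 2) (d + 1) (by omega) (by omega)
        · split
          · exact ih f₂ (i + 2) (d - 1) (by omega) (by omega)
          · exact ih f₂ (i + 1) d (by omega) (by omega)
      · rw [if_neg h, if_neg h]

theorem symAF_suff (cs : List Char) (f₁ : Nat) : ∀ f₂ : Nat, ∀ i : Int,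
    ((cs.length : Int) - i).toNat < f₁ → ((cs.length : Int) - i).toNat < f₂ →
    symAF cs f₁ i = symAF cs f₂ i := by
  induction f₁ with
  | zero => intro f₂ i h1 _; omega
  | succ f₁ ih =>
    intro f₂ i h1 h2
    match f₂, h2 with
    | f₂ + 1, h2 =>
      unfold symAF
      by_cases h : i < (cs.length : Int) ∧ ¬ PySem.Chars.isspace (PySem.List.pyGetD cs i ' ') ∧
          PySem.List.pyGetD cs i ' ' ≠ '(' ∧ PySem.List.pyGetD cs i ' ' ≠ ')'
      · rw [if_pos h, if_pos h]; exact ih f₂ (i + 1) (by omega) (by omega)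
      · rw [if_neg h, if_neg h]

theorem wsAF_suff (cs : List Char) (f₁ : Nat) : ∀ f₂ : Nat, ∀ i : Int,
    ((cs.length : Int) - i).toNat < f₁ → ((cs.length : Int) - i).toNat < f₂ →
    wsAF cs f₁ i = wsAF cs f₂ i := by
  induction f₁ with
  | zero => intro f₂ i h1 _; omega
  | succ f₁ ih =>
    intro f₂ i h1 h2
    match f₂, h2 with
    | f₂ + 1, h2 =>
      unfold wsAF
      by_cases hlt : i < (cs.length : Int)
      · rw [if_pos hlt, if_pos hlt]
        split
        · exact ih f₂ (i + 1) (by omega) (by omega)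
        · split
          · have hge : i + 2 ≤ lineA cs (i + 2) := lineAF_ge cs _ (i + 2)
            exact ih f₂ (lineA cs (i + 2)) (by omega) (by omega)
          · split
            · have hge : i + 2 ≤ blockA cs i := loopAF_ge cs _ (i + 2) 1
              exact ih f₂ (blockA cs i) (by omega) (by omega)
            · rfl
      · rw [if_neg hlt, if_neg hlt]

-- one-step unfolding facts for A's canonically fuelled wrappers
theorem lineA_stop (cs : List Char) (i : Int)
    (h : ¬ (i < (cs.length : Int) ∧ PySem.List.pyGetD cs i ' ' ≠ '\n')) : lineA cs i = i := by
  unfold lineA; unfold lineAF; rw [if_neg h]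

theorem lineA_step (cs : List Char) (i : Int)
    (h : i < (cs.length : Int) ∧ PySem.List.pyGetD cs i ' ' ≠ '\n') :
    lineA cs i = lineA cs (i + 1) := by
  unfold lineA
  conv_lhs => rw [lineAF, if_pos h]
  exact lineAF_suff cs _ _ (i + 1) (by omega) (by omega)

theorem symA_stop (cs : List Char) (i : Int)
    (h : ¬ (i < (cs.length : Int) ∧ ¬ PySem.Chars.isspace (PySem.List.pyGetD cs i ' ') ∧
        PySem.List.pyGetD cs i ' ' ≠ '(' ∧ PySem.List.pyGetD cs i ' ' ≠ ')')) :
    symA cs i = i := by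
  unfold symA; unfold symAF; rw [if_neg h]

theorem symA_step (cs : List Char) (i : Int)
    (h : i < (cs.length : Int) ∧ ¬ PySem.Chars.isspace (PySem.List.pyGetD cs i ' ') ∧
        PySem.List.pyGetD cs i ' ' ≠ '(' ∧ PySem.List.pyGetD cs i ' ' ≠ ')') :
    symA cs i = symA cs (i + 1) := by
  unfold symA
  conv_lhs => rw [symAF, if_pos h]
  exact symAF_suff cs _ _ (i + 1) (by omega) (by omega)

theorem wsA_stop_end (cs : List Char) (i : Int) (h : ¬ i < (cs.length : Int)) :
    wsA cs i = i := by
  unfold wsA; unfold wsAF; rw [if_neg h]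

theorem wsA_space (cs : List Char) (i : Int) (hlt : i < (cs.length : Int))
    (hsp : PySem.Chars.isspace (PySem.List.pyGetD cs i ' ')) :
    wsA cs i = wsA cs (i + 1) := by
  unfold wsA
  conv_lhs => rw [wsAF, if_pos hlt, if_pos hsp]
  exact wsAF_suff cs _ _ (i + 1) (by omega) (by omega)

theorem wsA_line (cs : List Char) (i : Int) (hlt : i < (cs.length : Int))
    (hsp : ¬ PySem.Chars.isspace (PySem.List.pyGetD cs i ' '))
    (hlc : PySem.List.pyGetD cs i ' ' = ';' ∧ i + 1 < (cs.length : Int) ∧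
        PySem.List.pyGetD cs (i + 1) ' ' = ';') :
    wsA cs i = wsA cs (lineA cs (i + 2)) := by
  unfold wsA
  conv_lhs => rw [wsAF, if_pos hlt, if_neg hsp, if_pos hlc]
  have hge : i + 2 ≤ lineA cs (i + 2) := lineAF_ge cs _ (i + 2)
  exact wsAF_suff cs _ _ (lineA cs (i + 2)) (by omega) (by omega)

theorem wsA_block (cs : List Char) (i : Int) (hlt : i < (cs.length : Int))
    (hsp : ¬ PySem.Chars.isspace (PySem.List.pyGetD cs i ' '))
    (hlc : ¬ (PySem.List.pyGetD cs i ' ' = ';' ∧ i + 1 < (cs.length : Int) ∧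
        PySem.List.pyGetD cs (i + 1) ' ' = ';'))
    (hbc : PySem.List.pyGetD cs i ' ' = '(' ∧ i + 1 < (cs.length : Int) ∧
        PySem.List.pyGetD cs (i + 1) ' ' = ';') :
    wsA cs i = wsA cs (blockA cs i) := by
  unfold wsA
  conv_lhs => rw [wsAF, if_pos hlt, if_neg hsp, if_neg hlc, if_pos hbc]
  have hge : i + 2 ≤ blockA cs i := loopAF_ge cs _ (i + 2) 1
  exact wsAF_suff cs _ _ (blockA cs i) (by omega) (by omega)

theorem wsA_break (cs : List Char) (i : Int) (hlt : i < (cs.length : Int))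
    (hsp : ¬ PySem.Chars.isspace (PySem.List.pyGetD cs i ' '))
    (hlc : ¬ (PySem.List.pyGetD cs i ' ' = ';' ∧ i + 1 < (cs.length : Int) ∧
        PySem.List.pyGetD cs (i + 1) ' ' = ';'))
    (hbc : ¬ (PySem.List.pyGetD cs i ' ' = '(' ∧ i + 1 < (cs.length : Int) ∧
        PySem.List.pyGetD cs (i + 1) ' ' = ';')) :
    wsA cs i = i := by
  unfold wsA; unfold wsAF; rw [if_pos hlt, if_neg hsp, if_neg hlc, if_neg hbc]

-- one-step unfolding facts for loopA under its canonical fuel, phrased on entryA's term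
theorem loopA_step_open (cs : List Char) (i d : Int) (hg : i < (cs.length : Int) ∧ 0 < d)
    (hop : PySem.List.pyGetD cs i ' ' = '(' ∧ i + 1 < (cs.length : Int) ∧
        PySem.List.pyGetD cs (i + 1) ' ' = ';') :
    loopAF cs (((cs.length : Int) - i).toNat + 1) i d =
      loopAF cs (((cs.length : Int) - (i + 2)).toNat + 1) (i + 2) (d + 1) := by
  conv_lhs => rw [loopAF, if_pos hg, if_pos hop]
  exact loopAF_suff cs _ _ (i + 2) (d + 1) (by omega) (by omega)

theorem loopA_step_close (cs : List Char) (i d : Int) (hg : i < (cs.length : Int) ∧ 0 < d)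
    (hop : ¬ (PySem.List.pyGetD cs i ' ' = '(' ∧ i + 1 < (cs.length : Int) ∧
        PySem.List.pyGetD cs (i + 1) ' ' = ';'))
    (hcl : PySem.List.pyGetD cs i ' ' = ';' ∧ i + 1 < (cs.length : Int) ∧
        PySem.List.pyGetD cs (i + 1) ' ' = ')') :
    loopAF cs (((cs.length : Int) - i).toNat + 1) i d =
      loopAF cs (((cs.length : Int) - (i + 2)).toNat + 1) (i + 2) (d - 1) := by
  conv_lhs => rw [loopAF, if_pos hg, if_neg hop, if_pos hcl]
  exact loopAF_suff cs _ _ (i + 2) (d - 1) (by omega) (by omega)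

theorem loopA_step_other (cs : List Char) (i d : Int) (hg : i < (cs.length : Int) ∧ 0 < d)
    (hop : ¬ (PySem.List.pyGetD cs i ' ' = '(' ∧ i + 1 < (cs.length : Int) ∧
        PySem.List.pyGetD cs (i + 1) ' ' = ';'))
    (hcl : ¬ (PySem.List.pyGetD cs i ' ' = ';' ∧ i + 1 < (cs.length : Int) ∧
        PySem.List.pyGetD cs (i + 1) ' ' = ')')) :
    loopAF cs (((cs.length : Int) - i).toNat + 1) i d =
      loopAF cs (((cs.length : Int) - (i + 1)).toNat + 1) (i + 1) d := by
  conv_lhs => rw [loopAF, if_pos hg, if_neg hop, if_neg hcl]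
  exact loopAF_suff cs _ _ (i + 1) d (by omega) (by omega)

theorem loopA_stop (cs : List Char) (i d : Int) (hg : ¬ (i < (cs.length : Int) ∧ 0 < d)) :
    loopAF cs (((cs.length : Int) - i).toNat + 1) i d = i := by
  rw [loopAF, if_neg hg]

-- B's inner symbol loop computes the slice bounded by A's symbol loop (same fuel)
theorem symBF_eq (cs : List Char) (start : Int) (f : Nat) (j : Int) :
    symBF cs start f j =
      (some (String.ofList (PySem.List.slice cs (some start) (some (symAF cs f j)))), symAF cs f j) := by
  induction f generalizing j with
  | zero => rfl
  | succ f ih =>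
    unfold symBF symAF
    split
    · exact ih (j + 1)
    · rfl

-- the main bisimulation: B's machine at (i, mode) equals A's staged pipeline resumed
-- at the corresponding place
theorem scanBF_eq (cs : List Char) (f : Nat) : ∀ i mode : Int,
    ((cs.length : Int) - i).toNat < f →
    scanBF cs f i mode = postA cs (wsA cs (entryA cs i mode)) := by
  induction f with
  | zero => intro i mode h; omega
  | succ f ih =>
    intro i mode hN
    by_cases hi : i < (cs.length : Int)
    · rw [scanBF, if_pos hi]
      by_cases hm1 : 1 ≤ mode
      · rw [if_pos hm1]
        have hent : entryA cs i mode = loopAF cs (((cs.length : Int) - i).toNat + 1) i mode := by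
          simp [entryA, hm1]
        have hg : i < (cs.length : Int) ∧ 0 < mode := ⟨hi, by omega⟩
        by_cases hop : PySem.List.pyGetD cs i ' ' = '(' ∧ i + 1 < (cs.length : Int) ∧
            PySem.List.pyGetD cs (i + 1) ' ' = ';'
        · rw [if_pos hop, ih (i + 2) (mode + 1) (by omega), hent,
            loopA_step_open cs i mode hg hop]
          have : entryA cs (i + 2) (mode + 1) =
              loopAF cs (((cs.length : Int) - (i + 2)).toNat + 1) (i + 2) (mode + 1) := by
            simp only [entryA, if_pos (show (1 : Int) ≤ mode + 1 by omega)]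
          rw [this]
        · rw [if_neg hop]
          by_cases hcl : PySem.List.pyGetD cs i ' ' = ';' ∧ i + 1 < (cs.length : Int) ∧
              PySem.List.pyGetD cs (i + 1) ' ' = ')'
          · rw [if_pos hcl, ih (i + 2) (mode - 1) (by omega), hent,
              loopA_step_close cs i mode hg hop hcl]
            by_cases hm2 : 1 ≤ mode - 1
            · have : entryA cs (i + 2) (mode - 1) =
                  loopAF cs (((cs.length : Int) - (i + 2)).toNat + 1) (i + 2) (mode - 1) := by
                simp [entryA, hm2]
              rw [this]
            · have hm0 : mode - 1 = 0 := by omega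
              have h1 : entryA cs (i + 2) (mode - 1) = i + 2 := by
                simp [entryA, hm0]
              have h2 : loopAF cs (((cs.length : Int) - (i + 2)).toNat + 1) (i + 2) (mode - 1)
                  = i + 2 := loopA_stop cs (i + 2) (mode - 1) (by omega)
              rw [h1, h2]
          · rw [if_neg hcl, ih (i + 1) mode (by omega), hent,
              loopA_step_other cs i mode hg hop hcl]
            have : entryA cs (i + 1) mode =
                loopAF cs (((cs.length : Int) - (i + 1)).toNat + 1) (i + 1) mode := by
              simp [entryA, hm1]
            rw [this]
      · rw [if_neg hm1]
        by_cases hmL : mode = -1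
        · rw [if_pos hmL, hmL]
          have hent : entryA cs i (-1) = lineA cs i := by simp [entryA]
          by_cases hnl : PySem.List.pyGetD cs i ' ' = '\n'
          · rw [if_pos hnl, ih (i + 1) 0 (by omega), hent]
            have h1 : entryA cs (i + 1) 0 = i + 1 := by simp [entryA]
            have h2 : lineA cs i = i := lineA_stop cs i (by simp [hnl])
            have h3 : wsA cs i = wsA cs (i + 1) :=
              wsA_space cs i hi (by rw [hnl]; decide)
            rw [h1, h2, h3]
          · rw [if_neg hnl, ih (i + 1) (-1) (by omega), hent]
            have h1 : entryA cs (i + 1) (-1) = lineA cs (i + 1) := by simp [entryA]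
            have h2 : lineA cs i = lineA cs (i + 1) := lineA_step cs i ⟨hi, hnl⟩
            rw [h1, h2]
        · rw [if_neg hmL]
          have hent : entryA cs i mode = i := by simp [entryA, hm1, hmL]
          rw [hent]
          by_cases hsp : PySem.Chars.isspace (PySem.List.pyGetD cs i ' ')
          · rw [if_pos hsp, ih (i + 1) mode (by omega)]
            have h1 : entryA cs (i + 1) mode = i + 1 := by simp [entryA, hm1, hmL]
            rw [h1, wsA_space cs i hi hsp]
          · rw [if_neg hsp]
            by_cases hlc : PySem.List.pyGetD cs i ' ' = ';' ∧ i + 1 < (cs.length : Int) ∧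
                PySem.List.pyGetD cs (i + 1) ' ' = ';'
            · rw [if_pos hlc, ih (i + 2) (-1) (by omega)]
              have h1 : entryA cs (i + 2) (-1) = lineA cs (i + 2) := by simp [entryA]
              rw [h1, wsA_line cs i hi hsp hlc]
            · rw [if_neg hlc]
              by_cases hbc : PySem.List.pyGetD cs i ' ' = '(' ∧ i + 1 < (cs.length : Int) ∧
                  PySem.List.pyGetD cs (i + 1) ' ' = ';'
              · rw [if_pos hbc, ih (i + 2) 1 (by omega)]
                have h1 : entryA cs (i + 2) 1 =
                    loopAF cs (((cs.length : Int) - (i + 2)).toNat + 1) (i + 2) 1 := by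
                  simp [entryA]
                rw [h1, wsA_block cs i hi hsp hlc hbc, blockA]
              · rw [if_neg hbc, wsA_break cs i hi hsp hlc hbc]
                by_cases hpar : PySem.List.pyGetD cs i ' ' = '(' ∨ PySem.List.pyGetD cs i ' ' = ')'
                · rw [if_pos hpar]
                  have hsym : symA cs i = i := by
                    apply symA_stop
                    rcases hpar with h | h <;> simp [h]
                  simp [postA, hsym]
                · rw [if_neg hpar]
                  push Not at hpar
                  have hguard : i < (cs.length : Int) ∧
                      ¬ PySem.Chars.isspace (PySem.List.pyGetD cs i ' ') ∧
                      PySem.List.pyGetD cs i ' ' ≠ '(' ∧ PySem.List.pyGetD cs i ' ' ≠ ')' :=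
                    ⟨hi, hsp, hpar.1, hpar.2⟩
                  have hsym : symA cs i = symA cs (i + 1) := symA_step cs i hguard
                  have hge : i + 1 ≤ symA cs (i + 1) := symAF_ge cs _ (i + 1)
                  simp only [postA, symB]
                  rw [symBF_eq]
                  rw [if_neg (by omega), ← symA, ← hsym, if_neg (by omega)]
    · rw [scanBF, if_neg hi]
      have he : entryA cs i mode = i := by
        unfold entryA
        split
        · exact loopA_stop cs i mode (by omega)
        · split
          · exact lineA_stop cs i (by omega)
          · rfl
      rw [he, wsA_stop_end cs i hi]
      simp only [postA]
      rw [if_pos (show i ≥ (cs.length : Int) by omega)]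

-- ===== VERDICT (by name: the statement is the Claim_ definition above) =====
theorem read_symbol_spec : Claim_equal_read_symbol := by
  intro text i _hdom _hpre
  simp only [Spec_read_symbol, read_symbol, read_symbol_alt]
  rw [scanBF_eq text.toList (((text.toList.length : Int) - i).toNat + 1) i 0 (by omega)]
  have : entryA text.toList i 0 = i := by simp [entryA]
  rw [this]
  rfl
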